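-- pv_equiv track=rewrite | github.com/TomRedLev/stage_uge_2021 | pw/ex1/src/ex1.py | determine_combination
-- ===== SOURCE A (Python) =====
-- def determine_combination(val) :
--     res = []
--     def determine_combination_aux(val, lst_val) :
--         if sum(lst_val) > val :
--             return
--         if sum(lst_val) == val and len(lst_val) >= val-1 :
--             res.append(lst_val)
--         for i in range(0, 2) :
--             determine_combination_aux(val, lst_val + [i + 1])
--     determine_combination_aux(val, [])
--
--     return res
-- ===== SOURCE B (Python) =====
-- def determine_combination(val):
--     # Only combinations matching: 1/2-sequences summing to val with length >= val-1,
--     # i.e. the all-ones sequence, then the single-2 sequences with the 2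
--     # moving from the last position to the first (matching A's DFS order).
--     if val < 0:
--         return []
--     res = [[1] * val]
--     for i in range(val - 2, -1, -1):
--         res.append([1] * i + [2] + [1] * (val - 2 - i))
--     return res
-- ===== Notes on version B (the rewrite author's own statement) =====
-- stated objective: faster
-- what changed: Replaced the exponential DFS over all 1/2-sequences with direct construction of the only qualifying sequences (all-ones, then each single-2 placement from last to first position).
import Mathlib
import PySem

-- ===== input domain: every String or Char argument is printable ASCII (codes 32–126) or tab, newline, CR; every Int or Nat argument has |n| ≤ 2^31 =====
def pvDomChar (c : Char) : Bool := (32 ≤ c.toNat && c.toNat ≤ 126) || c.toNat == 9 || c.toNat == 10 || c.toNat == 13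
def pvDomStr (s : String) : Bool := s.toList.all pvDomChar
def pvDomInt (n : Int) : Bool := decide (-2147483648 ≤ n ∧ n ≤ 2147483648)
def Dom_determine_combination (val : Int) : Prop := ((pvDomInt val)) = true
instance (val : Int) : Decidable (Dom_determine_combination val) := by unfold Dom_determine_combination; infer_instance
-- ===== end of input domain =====

-- B replaces A's exponential DFS over all 1/2-sequences by directly emitting the
-- qualifying sequences (all-ones, then each single-2 placement); objective: faster.

-- ===== PORT A =====
-- A's nested DFS accumulates into res; the res list in DFS order is the flattening below.
def determine_combination_aux (val : Int) (lst_val : List Int) : List (List Int) :=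
  if lst_val.sum > val then []
  else
    (if lst_val.sum = val ∧ (lst_val.length : Int) ≥ val - 1 then [lst_val] else []) ++
    determine_combination_aux val (lst_val ++ [1]) ++
    determine_combination_aux val (lst_val ++ [2])
termination_by (val + 1 - lst_val.sum).toNat
decreasing_by
  · simp only [List.sum_append, List.sum_cons, List.sum_nil]
    omega
  · simp only [List.sum_append, List.sum_cons, List.sum_nil]
    omega

def determine_combination (val : Int) : List (List Int) :=
  determine_combination_aux val []

-- ===== PORT B =====
def determine_combination_alt (val : Int) : List (List Int) :=
  if val < 0 then []
  else
    (PySem.List.pyRange (val - 2) (-1) (-1)).foldl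
      (fun res i =>
        res ++ [List.replicate i.toNat 1 ++ [2] ++ List.replicate (val - 2 - i).toNat 1])
      [List.replicate val.toNat 1]

-- ===== PRECONDITION & SPEC =====
-- A recurses one frame per accumulated element, reaching depth val+3, so under
-- CPython's default recursion limit (1000) it raises RecursionError for val ≥ 997;
-- Pre_ excludes exactly those inputs and nothing else.
def Pre_determine_combination (val : Int) : Prop := val ≤ 996
instance (val : Int) : Decidable (Pre_determine_combination val) := by unfold Pre_determine_combination; infer_instance
def pvWitness_determine_combination : Int := (5)

def Spec_determine_combination (val : Int) (out : List (List Int)) : Prop := out = determine_combination_alt val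
instance (val : Int) (out : List (List Int)) : Decidable (Spec_determine_combination val out) := by unfold Spec_determine_combination; infer_instance

-- ===== CLAIM (what is proved, stated in full; the proofs are below) =====
def Claim_equal_determine_combination : Prop := ∀ (val : Int), Dom_determine_combination val → Pre_determine_combination val → Spec_determine_combination val (determine_combination val)

-- ===== LEMMAS AND PROOFS =====

-- All 1/2-sequences summing to r with at most one 2, in A's DFS order
-- (all-ones first, then the 2 moving from the last position to the first).
def G0 (r : Nat) : List (List Int) :=
  List.replicate r 1 ::
    (List.range (r - 1)).map
      (fun k => List.replicate (r - 2 - k) 1 ++ [2] ++ List.replicate k 1)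

-- what the DFS below a node yields, by the number of 2s already placed
def H (c : Nat) (r : Nat) : List (List Int) :=
  if c = 0 then G0 r else if c = 1 then [List.replicate r 1] else []

theorem aux_gt (val : Int) (lst : List Int) (h : lst.sum > val) :
    determine_combination_aux val lst = [] := by
  rw [determine_combination_aux]
  simp [h]

theorem sum_count (lst : List Int) (h2 : ∀ x ∈ lst, x = 1 ∨ x = 2) :
    lst.sum = (lst.length : Int) + lst.count 2 := by
  induction lst with
  | nil => simp
  | cons a t ih =>
    have ha := h2 a (List.mem_cons_self ..)
    have ht := ih (fun x hx => h2 x (List.mem_cons_of_mem _ hx))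
    rcases ha with h1 | h1 <;> subst h1 <;>
      simp [ht] <;> ring

theorem G0_zero : G0 0 = [[]] := by simp [G0]

theorem G0_one : G0 1 = [[1]] := by simp [G0]

theorem G0_rec (r : Nat) (h : 2 ≤ r) :
    G0 r = (G0 (r - 1)).map (fun e => 1 :: e) ++ [2 :: List.replicate (r - 2) 1] := by
  unfold G0
  simp only [List.map_cons, List.map_map, List.cons_append]
  congr 1
  · rw [← List.replicate_succ]; congr 1; omega
  · rw [show r - 1 = (r - 2) + 1 by omega, List.range_succ, List.map_append]
    congr 1
    · simp only [Nat.add_sub_cancel]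
      apply List.map_congr_left
      intro k hk
      have hk' : k < r - 2 := List.mem_range.mp hk
      simp only [Function.comp]
      rw [show r - 2 - k = (r - 2 + 1 - 2 - k) + 1 by omega, List.replicate_succ]
      simp
    · simp

theorem aux_char (r : Nat) : ∀ (val : Int) (lst : List Int),
    (val - lst.sum).toNat = r → (∀ x ∈ lst, x = 1 ∨ x = 2) → lst.sum ≤ val →
    determine_combination_aux val lst = (H (lst.count 2) r).map (lst ++ ·) := by
  induction r using Nat.strong_induction_on with
  | _ r ih =>
    intro val lst hr h2 hle
    have hsum := sum_count lst h2
    rw [determine_combination_aux, if_neg (by omega)]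
    -- children
    have hmap1 : (fun e => (lst ++ [(1:Int)]) ++ e) = (lst ++ ·) ∘ ((1:Int) :: ·) := by
      funext e; simp
    have hmap2 : (fun e => (lst ++ [(2:Int)]) ++ e) = (lst ++ ·) ∘ ((2:Int) :: ·) := by
      funext e; simp
    have h2' : ∀ x ∈ lst ++ [(1:Int)], x = 1 ∨ x = 2 := by
      intro x hx; rcases List.mem_append.mp hx with h | h
      · exact h2 x h
      · left; simpa using h
    have h2'' : ∀ x ∈ lst ++ [(2:Int)], x = 1 ∨ x = 2 := by
      intro x hx; rcases List.mem_append.mp hx with h | h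
      · exact h2 x h
      · right; simpa using h
    have hc1 : (lst ++ [(1:Int)]).count 2 = lst.count 2 := by
      simp [List.count_append]
    have hc2 : (lst ++ [(2:Int)]).count 2 = lst.count 2 + 1 := by
      simp [List.count_append]
    rcases Nat.lt_or_ge r 2 with hr2 | hr2
    · rcases Nat.lt_or_ge r 1 with hr1 | hr1
      · -- r = 0 : sum = val
        have h0 : r = 0 := by omega
        subst h0
        have hv : lst.sum = val := by omega
        rw [aux_gt val (lst ++ [1]) (by simp [List.sum_append]; omega),
            aux_gt val (lst ++ [2]) (by simp [List.sum_append]; omega)]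
        by_cases hc : lst.count 2 ≤ 1
        · rw [if_pos ⟨hv, by omega⟩]
          interval_cases h : lst.count 2 <;> simp [H, G0_zero]
        · rw [if_neg (by omega)]
          have : ¬ lst.count 2 = 0 := by omega
          have : ¬ lst.count 2 = 1 := by omega
          simp_all [H]
      · -- r = 1
        have h1r : r = 1 := by omega
        subst h1r
        rw [if_neg (by omega)]
        rw [ih 0 (by omega) val (lst ++ [1])
              (by simp [List.sum_append]; omega) h2' (by simp [List.sum_append]; omega),
            aux_gt val (lst ++ [2]) (by simp [List.sum_append]; omega)]
        rw [hc1, hmap1, ← List.map_map]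
        by_cases hc : lst.count 2 = 0
        · simp [H, hc, G0_zero, G0_one]
        · by_cases hc' : lst.count 2 = 1
          · simp [H, hc', List.replicate_succ]
          · simp [H, hc, hc']
    · -- r ≥ 2
      rw [if_neg (by omega)]
      rw [ih (r - 1) (by omega) val (lst ++ [1])
            (by simp [List.sum_append]; omega) h2' (by simp [List.sum_append]; omega),
          ih (r - 2) (by omega) val (lst ++ [2])
            (by simp [List.sum_append]; omega) h2'' (by simp [List.sum_append]; omega)]
      rw [hc1, hc2, hmap1, hmap2, ← List.map_map, ← List.map_map]
      simp only [List.nil_append]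
      rw [← List.map_append]
      congr 1
      by_cases hc : lst.count 2 = 0
      · simp only [H, hc, if_pos, Nat.zero_add]
        rw [G0_rec r hr2]
        simp
      · by_cases hc' : lst.count 2 = 1
        · simp only [H, hc', if_true]
          rw [show r = (r - 1) + 1 by omega]
          simp [List.replicate_succ]
        · have : ¬ lst.count 2 + 1 = 1 := by omega
          simp [H, hc, hc']

theorem portA_eq_G0 (val : Int) (h : 0 ≤ val) :
    determine_combination val = G0 val.toNat := by
  unfold determine_combination
  rw [aux_char val.toNat val [] (by simp) (by simp) (by simpa)]
  simp [H]

theorem portA_neg (val : Int) (h : val < 0) : determine_combination val = [] := by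
  unfold determine_combination
  exact aux_gt val [] (by simpa)

theorem foldl_concat_map {α β : Type} (f : α → β) :
    ∀ (l : List α) (init : List β),
      l.foldl (fun res k => res ++ [f k]) init = init ++ l.map f := by
  intro l
  induction l with
  | nil => simp
  | cons a t ih => intro init; simp [ih]

theorem portB_eq_G0 (val : Int) (h : 0 ≤ val) :
    determine_combination_alt val = G0 val.toNat := by
  unfold determine_combination_alt
  rw [if_neg (by omega), PySem.List.pyRange_neg_one]
  have hab : (val - 2 - (-1)).toNat = val.toNat - 1 := by omega
  rw [hab, List.foldl_map, foldl_concat_map]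
  unfold G0
  rw [List.singleton_append]
  congr 1
  apply List.map_congr_left
  intro k hk
  have hk' : k < val.toNat - 1 := List.mem_range.mp hk
  have e1 : (val - 2 - (k : Int)).toNat = val.toNat - 2 - k := by omega
  have e2 : (val - 2 - (val - 2 - (k : Int))).toNat = k := by omega
  rw [e1, e2]

-- ===== VERDICT (by name: the statement is the Claim_ definition above) =====
theorem determine_combination_spec : Claim_equal_determine_combination := by
  intro val _ _
  unfold Spec_determine_combination
  by_cases h : val < 0
  · rw [portA_neg val h]
    simp [determine_combination_alt, h]
  · rw [portA_eq_G0 val (by omega), portB_eq_G0 val (by omega)]
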